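-- pv_equiv track=rewrite | github.com/the-alet/python-spbu | 113097.py | max_layer
-- ===== SOURCE A (Python) =====
-- def can_fit(n, a, b, w, h, d):
--     # Размеры модуля с защитой
--     mw1, mw2 = a + 2 * d, b + 2 * d
--     mh1, mh2 = b + 2 * d, a + 2 * d
--
--     # Количество модулей по ширине и высоте
--     cw1, cw2 = w // mw1, w // mw2
--     ch1, ch2 = h // mh1, h // mh2
--
--     # Общее количество модулей
--     return max(cw1 * ch1, cw2 * ch2) >= n
--
-- def max_layer(n, a, b, w, h):
--     l, r = 0, min(w // 2, h // 2)  # Максимально возможное значение d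
--
--     while l < r:
--         m = (l + r + 1) // 2  # Проверяем верхнюю половину
--         if can_fit(n, a, b, w, h, m):
--             l = m  # Если подходит, ищем большее значение
--         else:
--             r = m - 1  # Иначе ищем меньшее значение
--
--     return l
-- ===== SOURCE B (Python) =====
-- def can_fit(n, a, b, w, h, d):
--     mw1, mw2 = a + 2 * d, b + 2 * d
--     mh1, mh2 = b + 2 * d, a + 2 * d
--     cw1, cw2 = w // mw1, w // mw2
--     ch1, ch2 = h // mh1, h // mh2
--     return max(cw1 * ch1, cw2 * ch2) >= n
--
-- def max_layer(n, a, b, w, h):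
--     r = min(w // 2, h // 2)
--     for d in range(r, 0, -1):
--         if can_fit(n, a, b, w, h, d):
--             return d
--     return 0
-- ===== Notes on version B (the rewrite author's own statement) =====
-- stated objective: simpler
-- what changed: max_layer's binary search over the margin d is replaced by a plain descending linear scan from min(w//2,h//2) down to 1 returning the first d that fits (0 if none); can_fit is unchanged.
-- outside the precondition, e.g. on max_layer(11, -15, 13, 39, 45): A returns 0, B returns 9; on max_layer(-5, -7, -12, 13, 34): A returns 3, B raises ZeroDivisionError
import Mathlib
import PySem

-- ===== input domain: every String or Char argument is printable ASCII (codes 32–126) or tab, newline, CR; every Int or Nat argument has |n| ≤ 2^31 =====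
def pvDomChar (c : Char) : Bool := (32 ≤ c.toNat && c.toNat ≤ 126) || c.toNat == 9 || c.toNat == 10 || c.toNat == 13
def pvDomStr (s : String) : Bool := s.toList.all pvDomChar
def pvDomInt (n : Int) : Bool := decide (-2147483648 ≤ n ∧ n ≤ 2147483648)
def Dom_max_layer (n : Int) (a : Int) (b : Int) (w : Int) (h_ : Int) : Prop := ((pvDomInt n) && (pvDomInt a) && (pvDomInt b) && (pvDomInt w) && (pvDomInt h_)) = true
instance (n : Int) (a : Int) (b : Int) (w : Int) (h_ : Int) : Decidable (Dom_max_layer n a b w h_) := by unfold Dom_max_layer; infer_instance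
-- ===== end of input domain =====

-- B replaces A's binary search over d by a plain descending linear scan (simpler; not faster).


-- ===== PORT A =====
-- helper can_fit, shared verbatim by both Python versions
def can_fit (n : Int) (a : Int) (b : Int) (w : Int) (h_ : Int) (d : Int) : Bool :=
  let mw1 := a + 2 * d; let mw2 := b + 2 * d
  let mh1 := b + 2 * d; let mh2 := a + 2 * d
  let cw1 := PySem.Int.floordiv w mw1; let cw2 := PySem.Int.floordiv w mw2
  let ch1 := PySem.Int.floordiv h_ mh1; let ch2 := PySem.Int.floordiv h_ mh2
  decide (max (cw1 * ch1) (cw2 * ch2) ≥ n)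

-- A's while-loop: l, r with midpoint m = (l + r + 1) // 2
def max_layer_loop (n : Int) (a : Int) (b : Int) (w : Int) (h_ : Int) (l : Int) (r : Int) : Int :=
  if l < r then
    let m := PySem.Int.floordiv (l + r + 1) 2
    if can_fit n a b w h_ m then max_layer_loop n a b w h_ m r
    else max_layer_loop n a b w h_ l (m - 1)
  else l
termination_by (r - l).toNat
decreasing_by
  all_goals
    have hb := PySem.Int.floordiv_two_mid_bounds (lo := l + 1) (hi := r) (by omega)
    have he : l + 1 + r = l + r + 1 := by ring
    rw [he] at hb
    omega

def max_layer (n : Int) (a : Int) (b : Int) (w : Int) (h_ : Int) : Int :=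
  max_layer_loop n a b w h_ 0 (min (PySem.Int.floordiv w 2) (PySem.Int.floordiv h_ 2))

-- ===== PORT B =====
-- B's for-loop over range(r, 0, -1): first d with can_fit, else 0
def max_layer_scan (n : Int) (a : Int) (b : Int) (w : Int) (h_ : Int) (d : Int) : Int :=
  if 1 ≤ d then
    if can_fit n a b w h_ d then d else max_layer_scan n a b w h_ (d - 1)
  else 0
termination_by d.toNat
decreasing_by omega

def max_layer_alt (n : Int) (a : Int) (b : Int) (w : Int) (h_ : Int) : Int :=
  max_layer_scan n a b w h_ (min (PySem.Int.floordiv w 2) (PySem.Int.floordiv h_ 2))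

-- ===== PRECONDITION & SPEC =====
-- Pre_ excludes inputs with a negative module side a or b in which the search loop actually runs
-- (min(w//2, h//2) ≥ 1): there can_fit may divide by a zero module size (ZeroDivisionError) and is
-- not monotone in d, so the value A's binary search happens to land on is an accident of its probe
-- sequence that no one would specify.
def Pre_max_layer (n : Int) (a : Int) (b : Int) (w : Int) (h_ : Int) : Prop :=
  (0 ≤ a ∧ 0 ≤ b) ∨ min (PySem.Int.floordiv w 2) (PySem.Int.floordiv h_ 2) ≤ 0
instance (n : Int) (a : Int) (b : Int) (w : Int) (h_ : Int) : Decidable (Pre_max_layer n a b w h_) := by unfold Pre_max_layer; infer_instance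

def pvWitness_max_layer : Int × Int × Int × Int × Int := (3, 1, 2, 10, 12)

def Spec_max_layer (n : Int) (a : Int) (b : Int) (w : Int) (h_ : Int) (out : Int) : Prop := out = max_layer_alt n a b w h_
instance (n : Int) (a : Int) (b : Int) (w : Int) (h_ : Int) (out : Int) : Decidable (Spec_max_layer n a b w h_ out) := by unfold Spec_max_layer; infer_instance

-- ===== CLAIM (what is proved, stated in full; the proofs are below) =====
def Claim_equal_max_layer : Prop := ∀ (n : Int) (a : Int) (b : Int) (w : Int) (h_ : Int), Dom_max_layer n a b w h_ → Pre_max_layer n a b w h_ → Spec_max_layer n a b w h_ (max_layer n a b w h_)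

-- ===== LEMMAS AND PROOFS =====

-- quotient is antitone in a positive divisor (numerator nonnegative)
lemma pv_ediv_anti (w c c' : Int) (hw : 0 ≤ w) (h0 : 0 < c) (hcc : c ≤ c') : w / c' ≤ w / c := by
  rw [show w = (w.toNat : Int) by omega, show c = (c.toNat : Int) by omega,
      show c' = (c'.toNat : Int) by omega]
  rw [← Int.natCast_div, ← Int.natCast_div]
  exact_mod_cast Nat.div_le_div_left (by omega) (by omega)

lemma pv_can_fit_mono (n a b w h_ d1 d2 : Int) (ha : 0 ≤ a) (hb : 0 ≤ b)
    (hw : 0 ≤ w) (hh : 0 ≤ h_) (h1 : 1 ≤ d1) (hd : d1 ≤ d2)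
    (hfit : can_fit n a b w h_ d2 = true) : can_fit n a b w h_ d1 = true := by
  have hp1 : (0:Int) < a + 2 * d1 := by omega
  have hp2 : (0:Int) < b + 2 * d1 := by omega
  have hq1 : (0:Int) < a + 2 * d2 := by omega
  have hq2 : (0:Int) < b + 2 * d2 := by omega
  simp only [can_fit, decide_eq_true_eq,
    PySem.Int.floordiv_eq_ediv_of_pos hp1, PySem.Int.floordiv_eq_ediv_of_pos hp2] at hfit ⊢
  rw [PySem.Int.floordiv_eq_ediv_of_pos hq1, PySem.Int.floordiv_eq_ediv_of_pos hq2,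
      PySem.Int.floordiv_eq_ediv_of_pos hq1, PySem.Int.floordiv_eq_ediv_of_pos hq2] at hfit
  have k1 : w / (a + 2 * d2) ≤ w / (a + 2 * d1) := pv_ediv_anti _ _ _ hw hp1 (by omega)
  have k2 : w / (b + 2 * d2) ≤ w / (b + 2 * d1) := pv_ediv_anti _ _ _ hw hp2 (by omega)
  have k3 : h_ / (b + 2 * d2) ≤ h_ / (b + 2 * d1) := pv_ediv_anti _ _ _ hh hp2 (by omega)
  have k4 : h_ / (a + 2 * d2) ≤ h_ / (a + 2 * d1) := pv_ediv_anti _ _ _ hh hp1 (by omega)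
  have n1 : (0:Int) ≤ w / (a + 2 * d2) := Int.ediv_nonneg hw (le_of_lt hq1)
  have n2 : (0:Int) ≤ w / (b + 2 * d2) := Int.ediv_nonneg hw (le_of_lt hq2)
  have n3 : (0:Int) ≤ h_ / (b + 2 * d2) := Int.ediv_nonneg hh (le_of_lt hq2)
  have n4 : (0:Int) ≤ h_ / (a + 2 * d2) := Int.ediv_nonneg hh (le_of_lt hq1)
  have m1 : w / (a + 2 * d2) * (h_ / (b + 2 * d2)) ≤ w / (a + 2 * d1) * (h_ / (b + 2 * d1)) :=
    mul_le_mul k1 k3 n3 (le_trans n1 k1)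
  have m2 : w / (b + 2 * d2) * (h_ / (a + 2 * d2)) ≤ w / (b + 2 * d1) * (h_ / (a + 2 * d1)) :=
    mul_le_mul k2 k4 n4 (le_trans n2 k2)
  calc n ≤ _ := hfit
    _ ≤ _ := max_le_max m1 m2

-- B's scan returns res when res is feasible (or 0) and everything in (res, hi] fails
lemma pv_scan_char (n a b w h_ : Int) : ∀ (k : Nat) (hi res : Int), hi.toNat ≤ k →
    0 ≤ res → res ≤ hi →
    (res = 0 ∨ (1 ≤ res ∧ can_fit n a b w h_ res = true)) →
    (∀ d, res < d → d ≤ hi → can_fit n a b w h_ d = false) →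
    max_layer_scan n a b w h_ hi = res := by
  intro k
  induction k with
  | zero =>
    intro hi res hk h0 hr hfeas _
    rw [max_layer_scan, if_neg (by omega)]
    rcases hfeas with h | h
    · omega
    · omega
  | succ k ih =>
    intro hi res hk h0 hr hfeas hfail
    rw [max_layer_scan]
    by_cases hhi : 1 ≤ hi
    · rw [if_pos hhi]
      by_cases hfit : can_fit n a b w h_ hi = true
      · rw [if_pos hfit]
        by_cases heq : res = hi
        · omega
        · exact absurd (hfail hi (by omega) le_rfl) (by simp [hfit])
      · rw [if_neg hfit]
        have hne : res ≠ hi := by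
          rcases hfeas with h | h
          · omega
          · intro he; exact hfit (he ▸ h.2)
        exact ih (hi - 1) res (by omega) h0 (by omega) hfeas
          (fun d hd1 hd2 => hfail d hd1 (by omega))
    · rw [if_neg hhi]
      rcases hfeas with h | h
      · omega
      · omega

-- A's binary search: characterisation of its result
lemma pv_loop_char (n a b w h_ : Int) (ha : 0 ≤ a) (hb : 0 ≤ b) (hw : 0 ≤ w) (hh : 0 ≤ h_) :
    ∀ (k : Nat) (l r : Int), (r - l).toNat ≤ k →
    0 ≤ l → l ≤ r →
    (l = 0 ∨ (1 ≤ l ∧ can_fit n a b w h_ l = true)) →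
    (max_layer_loop n a b w h_ l r = 0 ∨
       (1 ≤ max_layer_loop n a b w h_ l r ∧ can_fit n a b w h_ (max_layer_loop n a b w h_ l r) = true)) ∧
    l ≤ max_layer_loop n a b w h_ l r ∧ max_layer_loop n a b w h_ l r ≤ r ∧
    (∀ d, max_layer_loop n a b w h_ l r < d → d ≤ r → can_fit n a b w h_ d = false) := by
  intro k
  induction k with
  | zero =>
    intro l r hk h0 hlr hfeas
    have hlr' : l = r := by omega
    rw [max_layer_loop, if_neg (by omega)]
    exact ⟨hfeas, le_rfl, hlr, fun d hd1 hd2 => by omega⟩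
  | succ k ih =>
    intro l r hk h0 hlr hfeas
    rw [max_layer_loop]
    by_cases hcond : l < r
    · rw [if_pos hcond]
      have hmid := PySem.Int.floordiv_two_mid_bounds (lo := l + 1) (hi := r) (by omega)
      have he : l + 1 + r = l + r + 1 := by ring
      rw [he] at hmid
      set m := PySem.Int.floordiv (l + r + 1) 2 with hm
      by_cases hfit : can_fit n a b w h_ m = true
      · rw [if_pos hfit]
        exact ⟨(ih m r (by omega) (by omega) (by omega)
            (Or.inr ⟨by omega, hfit⟩)).1,
          by have := (ih m r (by omega) (by omega) (by omega) (Or.inr ⟨by omega, hfit⟩)).2.1; omega,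
          (ih m r (by omega) (by omega) (by omega) (Or.inr ⟨by omega, hfit⟩)).2.2.1,
          (ih m r (by omega) (by omega) (by omega) (Or.inr ⟨by omega, hfit⟩)).2.2.2⟩
      · rw [if_neg hfit]
        obtain ⟨p1, p2, p3, p4⟩ := ih l (m - 1) (by omega) h0 (by omega) hfeas
        refine ⟨p1, p2, by omega, fun d hd1 hd2 => ?_⟩
        by_cases hdm : d ≤ m - 1
        · exact p4 d hd1 hdm
        · -- m ≤ d ≤ r : infeasible since can_fit m = false and can_fit is downward monotone
          by_contra hc
          exact hfit (pv_can_fit_mono n a b w h_ m d ha hb hw hh (by omega) (by omega)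
            (by simpa using hc))
    · rw [if_neg hcond]
      exact ⟨hfeas, le_rfl, hlr, fun d hd1 hd2 => by omega⟩

-- ===== VERDICT (by name: the statement is the Claim_ definition above) =====
theorem max_layer_spec : Claim_equal_max_layer := by
  intro n a b w h_ _ hpre
  unfold Spec_max_layer max_layer max_layer_alt
  set r0 := min (PySem.Int.floordiv w 2) (PySem.Int.floordiv h_ 2) with hr0
  by_cases hr : r0 ≤ 0
  · rw [max_layer_loop, if_neg (by omega), max_layer_scan, if_neg (by omega)]
  · -- the loop really runs: Pre_ gives 0 ≤ a, 0 ≤ b, and r0 ≥ 1 forces w ≥ 2, h ≥ 2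
    rcases hpre with ⟨ha, hb⟩ | hpre
    · have hw2 : (0:Int) < 2 := by norm_num
      have hw : 2 ≤ w := by
        have h1 : 1 ≤ PySem.Int.floordiv w 2 := by omega
        rw [PySem.Int.floordiv_eq_ediv_of_pos hw2] at h1
        omega
      have hh : 2 ≤ h_ := by
        have h1 : 1 ≤ PySem.Int.floordiv h_ 2 := by omega
        rw [PySem.Int.floordiv_eq_ediv_of_pos hw2] at h1
        omega
      obtain ⟨p1, p2, p3, p4⟩ := pv_loop_char n a b w h_ ha hb (by omega) (by omega)
        (r0 - 0).toNat 0 r0 le_rfl le_rfl (by omega) (Or.inl rfl)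
      exact (pv_scan_char n a b w h_ r0.toNat r0 (max_layer_loop n a b w h_ 0 r0)
        le_rfl (by omega) p3 p1 p4).symm
    · omega
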